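-- pv_equiv track=rewrite | github.com/saisanthosh111/datscience_pyrhonbasics_project | S20180010053/Q9.py | getErrors
-- ===== SOURCE A (Python) =====
-- def getErrors(tree,visited,queue):
--     while len(queue) > 0:
--         element = queue.pop()
--         current = []
--         visited.append(element)
--         if element in tree:
--             for child in tree[element]:
--                 if child in current:
--                     return (False,'E2')
--
--                 if child in visited:
--                     return (False,'E3')
--
--                 current.append(child)
--                 queue.append(child)
--
--             if len(current) > 2:
--                 return (False,'E1')
--
--
--     return (True,'Nothing to worry')
-- ===== SOURCE B (Python) =====
-- def getErrors(tree, visited, queue):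
--     def scan(children):
--         seen = []
--         for child in children:
--             if child in seen:
--                 return 'E2'
--             if child in visited:
--                 return 'E3'
--             seen.append(child)
--         return None
--
--     def dfs(node):
--         visited.append(node)
--         if node not in tree:
--             return None
--         children = tree[node]
--         err = scan(children)
--         if err is not None:
--             return (False, err)
--         if len(children) > 2:
--             return (False, 'E1')
--         for child in reversed(children):
--             bad = dfs(child)
--             if bad is not None:
--                 return bad
--         return None
--
--     while queue:
--         bad = dfs(queue.pop())
--         if bad is not None:
--             return bad
--     return (True, 'Nothing to worry')
-- ===== Notes on version B (the rewrite author's own statement) =====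
-- stated objective: alternative
-- what changed: Replaces A's explicit-stack while-loop (pop from a shared mutable queue, push children back onto it) by a recursive DFS helper that descends into a node's children directly (in reverse order, matching the stack's LIFO discipline) and propagates the first error tuple upward; no child is ever pushed onto the queue.
import Mathlib
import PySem

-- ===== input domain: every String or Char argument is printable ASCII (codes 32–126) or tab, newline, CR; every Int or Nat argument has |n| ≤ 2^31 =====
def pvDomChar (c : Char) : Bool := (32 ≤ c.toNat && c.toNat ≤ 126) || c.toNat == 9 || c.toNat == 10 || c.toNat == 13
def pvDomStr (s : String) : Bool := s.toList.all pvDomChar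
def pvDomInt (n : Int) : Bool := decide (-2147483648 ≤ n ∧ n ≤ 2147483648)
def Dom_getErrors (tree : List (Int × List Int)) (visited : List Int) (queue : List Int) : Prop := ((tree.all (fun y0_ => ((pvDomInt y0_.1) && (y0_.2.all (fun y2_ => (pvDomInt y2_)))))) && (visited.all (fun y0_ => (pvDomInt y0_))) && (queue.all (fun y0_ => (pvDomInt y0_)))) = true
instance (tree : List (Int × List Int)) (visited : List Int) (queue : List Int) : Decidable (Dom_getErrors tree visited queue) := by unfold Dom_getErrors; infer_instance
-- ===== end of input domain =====

-- B rewrites A's explicit-stack loop as a recursive DFS (same return value; note both Pythons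
-- mutate `visited`/`queue` in place — the equivalence proved here is about the RETURn value only).

-- Totality guard shared by both ports: an upper bound on the number of pops/dfs-calls the
-- (always-terminating) Python performs; it is only decremented, never reached.
def pvFuel (tree : List (Int × List Int)) (queue : List Int) : Nat :=
  let S := tree.foldl (fun a p => a + p.2.length) 0
  queue.length + 2 * S * (S + 1) + 1

-- ===== PORT A =====
-- the inner `for child in tree[element]` loop: builds `current`, or returns the error pair
def scanChildrenA (visited : List Int) : List Int → List Int → Sum (List Int) (Bool × String)
  | [], current => .inl current
  | c :: cs, current =>
    if current.contains c then .inr (false, "E2")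
    else if visited.contains c then .inr (false, "E3")
    else scanChildrenA visited cs (current ++ [c])

-- the `while len(queue) > 0` loop; queue.pop() takes the LAST element, children are appended
def loopA (tree : List (Int × List Int)) : Nat → List Int → List Int → Bool × String
  | 0, _, _ => (true, "Nothing to worry")
  | fuel + 1, visited, queue =>
    if h : queue = [] then (true, "Nothing to worry")
    else
      let element := queue.getLast h
      let rest := queue.dropLast
      let visited' := visited ++ [element]
      match tree.lookup element with
      | none => loopA tree fuel visited' rest
      | some children =>
        match scanChildrenA visited' children [] with
        | .inr r => r
        | .inl current =>
          if current.length > 2 then (false, "E1")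
          else loopA tree fuel visited' (rest ++ current)

def getErrors (tree : List (Int × List Int)) (visited : List Int) (queue : List Int) : Bool × String :=
  loopA tree (pvFuel tree queue) visited queue

-- ===== PORT B =====
-- Source B's `scan(children)`: first duplicate/visited child decides the error code
def scanB (visited : List Int) : List Int → List Int → Option String
  | [], _ => none
  | c :: cs, seen =>
    if seen.contains c then some "E2"
    else if visited.contains c then some "E3"
    else scanB visited cs (seen ++ [c])

-- Source B's recursive `dfs` / its propagation over a list of nodes; .inl = "no error yet"
-- (remaining fuel, visited), .inr = the returned answer.  The subtype bound on the leftover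
-- fuel is only the termination guard.
mutual
def dfsB (tree : List (Int × List Int)) :
    (fuel : Nat) → Int → List Int → Sum ({f : Nat // f ≤ fuel} × List Int) (Bool × String)
  | 0, _, _ => .inr (true, "Nothing to worry")
  | fuel + 1, node, visited =>
    let visited' := visited ++ [node]
    match tree.lookup node with
    | none => .inl (⟨fuel, Nat.le_succ fuel⟩, visited')
    | some children =>
      match scanB visited' children [] with
      | some e => .inr (false, e)
      | none =>
        if children.length > 2 then .inr (false, "E1")
        else
          match dfsListB tree fuel children.reverse visited' with
          | .inl (⟨f', hf⟩, v') => .inl (⟨f', hf.trans (Nat.le_succ fuel)⟩, v')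
          | .inr r => .inr r
termination_by fuel _ _ => (fuel, 0)
decreasing_by exact Prod.Lex.left _ _ (Nat.lt_succ_self fuel)

def dfsListB (tree : List (Int × List Int)) :
    (fuel : Nat) → List Int → List Int → Sum ({f : Nat // f ≤ fuel} × List Int) (Bool × String)
  | fuel, [], visited => .inl (⟨fuel, Nat.le_refl fuel⟩, visited)
  | fuel, node :: rest, visited =>
    match dfsB tree fuel node visited with
    | .inr r => .inr r
    | .inl (⟨f', hf⟩, visited') =>
      match dfsListB tree f' rest visited' with
      | .inl (⟨f'', hf''⟩, v'') => .inl (⟨f'', hf''.trans hf⟩, v'')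
      | .inr r => .inr r
termination_by fuel l _ => (fuel, l.length + 1)
decreasing_by
  · exact Prod.Lex.right _ (Nat.lt_succ_self _ |>.trans_le (by omega))
  · rcases Nat.lt_or_ge f' fuel with h | h
    · exact Prod.Lex.left _ _ h
    · have heq : f' = fuel := Nat.le_antisymm hf h
      subst heq
      exact Prod.Lex.right _ (by simp)
end

def toResB (r : Sum ({f : Nat // f ≤ fuel} × List Int) (Bool × String)) : Bool × String :=
  match r with
  | .inl _ => (true, "Nothing to worry")
  | .inr res => res

-- Source B: `while queue: bad = dfs(queue.pop())` — the roots are consumed last-first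
def getErrors_alt (tree : List (Int × List Int)) (visited : List Int) (queue : List Int) : Bool × String :=
  toResB (dfsListB tree (pvFuel tree queue) queue.reverse visited)

-- ===== PRECONDITION & SPEC =====
def Spec_getErrors (tree : List (Int × List Int)) (visited : List Int) (queue : List Int) (out : Bool × String) : Prop := out = getErrors_alt tree visited queue
instance (tree : List (Int × List Int)) (visited : List Int) (queue : List Int) (out : Bool × String) : Decidable (Spec_getErrors tree visited queue out) := by unfold Spec_getErrors; infer_instance

-- ===== CLAIM (what is proved, stated in full; the proofs are below) =====
def Claim_equal_getErrors : Prop := ∀ (tree : List (Int × List Int)) (visited : List Int) (queue : List Int), Dom_getErrors tree visited queue → Spec_getErrors tree visited queue (getErrors tree visited queue)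

-- ===== LEMMAS AND PROOFS =====

-- A's inner loop equals B's scan (with, on success, current = seen ++ children)
theorem scan_bridge (v : List Int) (cs : List Int) : ∀ cur : List Int,
    scanChildrenA v cs cur =
      match scanB v cs cur with
      | some e => .inr (false, e)
      | none => .inl (cur ++ cs) := by
  induction cs with
  | nil => intro cur; simp [scanChildrenA, scanB]
  | cons c cs ih =>
    intro cur
    simp only [scanChildrenA, scanB]
    split_ifs with h1 h2
    · rfl
    · rfl
    · rw [ih (cur ++ [c])]; simp

-- dfsListB over an appended list is its sequential composition
theorem dfsListB_append (tree : List (Int × List Int)) (xs : List Int) : ∀ (fuel : Nat) (ys v : List Int),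
    toResB (dfsListB tree fuel (xs ++ ys) v) =
      (match dfsListB tree fuel xs v with
       | .inl (⟨f', _⟩, v') => toResB (dfsListB tree f' ys v')
       | .inr r => r) := by
  induction xs with
  | nil => intro fuel ys v; simp [dfsListB]
  | cons x xs ih =>
    intro fuel ys v
    simp only [List.cons_append, dfsListB]
    cases dfsB tree fuel x v with
    | inr r => simp [toResB]
    | inl p =>
      obtain ⟨⟨f', hf⟩, v'⟩ := p
      have hih := ih f' ys v'
      rcases h2 : dfsListB tree f' (xs ++ ys) v' with ⟨⟨f2, hf2⟩, v2⟩ | r2 <;>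
        rcases h3 : dfsListB tree f' xs v' with ⟨⟨f3, hf3⟩, v3⟩ | r3 <;>
        simp only [h2, h3, toResB] at hih ⊢ <;> exact hih

-- main bridge: A's stack loop on the reversed stack equals B's recursive descent
theorem loop_bridge (tree : List (Int × List Int)) : ∀ (fuel : Nat) (stack visited : List Int),
    loopA tree fuel visited stack.reverse = toResB (dfsListB tree fuel stack visited) := by
  intro fuel
  induction fuel with
  | zero =>
    intro stack visited
    cases stack with
    | nil => simp [loopA, dfsListB, toResB]
    | cons e rest => simp [loopA, dfsListB, dfsB, toResB]
  | succ f ih =>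
    intro stack visited
    cases stack with
    | nil => simp [loopA, dfsListB, toResB]
    | cons e rest =>
      have hne : rest.reverse ++ [e] ≠ [] := by simp
      have hget : ∀ (h : rest.reverse ++ [e] ≠ []), (rest.reverse ++ [e]).getLast h = e := by
        intro h
        simp
      simp only [List.reverse_cons, loopA, dif_neg hne, hget, List.dropLast_concat, dfsListB, dfsB]
      cases hl : tree.lookup e with
      | none =>
        rw [ih rest (visited ++ [e])]
        rcases h2 : dfsListB tree f rest (visited ++ [e]) with ⟨⟨f2, hf2⟩, v2⟩ | r2 <;>
          simp [h2, toResB]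
      | some children =>
        simp only
        rw [scan_bridge]
        cases hs : scanB (visited ++ [e]) children [] with
        | some err => simp [toResB]
        | none =>
          simp only [List.nil_append]
          by_cases hlen : children.length > 2
          · simp [hlen, toResB]
          · simp only [hlen, if_false]
            have h1 : rest.reverse ++ children = (children.reverse ++ rest).reverse := by simp
            rw [h1, ih (children.reverse ++ rest) (visited ++ [e])]
            rw [dfsListB_append tree children.reverse f rest (visited ++ [e])]
            rcases hd : dfsListB tree f children.reverse (visited ++ [e]) with ⟨⟨f', hf'⟩, v''⟩ | r
            · simp only [toResB]
              rcases dfsListB tree f' rest v'' with ⟨⟨f2, hf2⟩, v2⟩ | r2 <;> simp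
            · simp [toResB]

-- ===== VERDICT (by name: the statement is the Claim_ definition above) =====
theorem getErrors_spec : Claim_equal_getErrors := by
  intro tree visited queue _
  unfold Spec_getErrors getErrors getErrors_alt
  have := loop_bridge tree (pvFuel tree queue) queue.reverse visited
  simpa using this
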